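-- pv_equiv track=rewrite | github.com/432Emanuel/MWDR-Showcase | src/tools/build_resonance_places_dataset.py | _infer_intensity
-- ===== SOURCE A (Python) =====
-- def _infer_intensity(excerpt: str) -> int:
--     txt = excerpt.lower()
--     strong = ["life-changing", "blown me away", "bone", "beyond words", "terrifying", "profound", "ecstatic", "knochenmark", "speechless", "sprachlos"]
--     medium = ["breathtaking", "magical", "privileged", "calm washes", "otherworldly", "atemberaub"]
--     if any(k in txt for k in strong):
--         return 5
--     if any(k in txt for k in medium):
--         return 4
--     return 3
-- ===== SOURCE B (Python) =====
-- def _infer_intensity(excerpt: str) -> int: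
--     txt = excerpt.lower()
--     table = [
--         ("life-changing", 5), ("blown me away", 5), ("bone", 5), ("beyond words", 5),
--         ("terrifying", 5), ("profound", 5), ("ecstatic", 5), ("knochenmark", 5),
--         ("speechless", 5), ("sprachlos", 5),
--         ("breathtaking", 4), ("magical", 4), ("privileged", 4), ("calm washes", 4),
--         ("otherworldly", 4), ("atemberaub", 4),
--     ]
--     best = 3
--     for k, lvl in table:
--         if k in txt:
--             best = max(best, lvl)
--     return best
-- ===== Notes on version B (the rewrite author's own statement) =====
-- stated objective: alternative
-- what changed: Replaced the two ordered any()/early-return guards over separate keyword lists with a single keyword->level table and one accumulating max-pass (default 3), which reproduces strong-over-medium precedence because 5>4>3.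
import Mathlib
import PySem

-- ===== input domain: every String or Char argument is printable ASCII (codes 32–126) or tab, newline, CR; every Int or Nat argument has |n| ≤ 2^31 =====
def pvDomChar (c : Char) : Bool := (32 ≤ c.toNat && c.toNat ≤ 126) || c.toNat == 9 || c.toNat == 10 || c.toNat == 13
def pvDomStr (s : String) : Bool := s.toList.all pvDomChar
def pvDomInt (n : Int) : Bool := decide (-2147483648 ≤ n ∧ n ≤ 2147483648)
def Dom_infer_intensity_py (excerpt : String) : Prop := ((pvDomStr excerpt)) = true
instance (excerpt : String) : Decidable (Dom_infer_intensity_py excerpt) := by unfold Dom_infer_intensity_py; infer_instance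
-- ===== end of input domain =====

-- B replaces A's two ordered any()/early-return guards with a single keyword->level table
-- folded into an accumulated max (objective: alternative decomposition, same cost).


-- ===== PORT A =====
def infer_intensity_py (excerpt : String) : Int :=
  let txt := PySem.Str.lower excerpt
  let strong : List String := ["life-changing", "blown me away", "bone", "beyond words", "terrifying", "profound", "ecstatic", "knochenmark", "speechless", "sprachlos"]
  let medium : List String := ["breathtaking", "magical", "privileged", "calm washes", "otherworldly", "atemberaub"]
  if strong.any (fun k => PySem.Str.isIn k txt) then 5
  else if medium.any (fun k => PySem.Str.isIn k txt) then 4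
  else 3

-- ===== PORT B =====
def infer_intensity_py_alt (excerpt : String) : Int :=
  let txt := PySem.Str.lower excerpt
  let table : List (String × Int) :=
    [("life-changing", 5), ("blown me away", 5), ("bone", 5), ("beyond words", 5),
     ("terrifying", 5), ("profound", 5), ("ecstatic", 5), ("knochenmark", 5),
     ("speechless", 5), ("sprachlos", 5),
     ("breathtaking", 4), ("magical", 4), ("privileged", 4), ("calm washes", 4),
     ("otherworldly", 4), ("atemberaub", 4)]
  table.foldl (fun best p => if PySem.Str.isIn p.1 txt then max best p.2 else best) 3

-- ===== PRECONDITION & SPEC =====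
def Spec_infer_intensity_py (excerpt : String) (out : Int) : Prop := out = infer_intensity_py_alt excerpt
instance (excerpt : String) (out : Int) : Decidable (Spec_infer_intensity_py excerpt out) := by unfold Spec_infer_intensity_py; infer_instance

-- ===== CLAIM (what is proved, stated in full; the proofs are below) =====
def Claim_equal_infer_intensity_py : Prop := ∀ (excerpt : String), Dom_infer_intensity_py excerpt → Spec_infer_intensity_py excerpt (infer_intensity_py excerpt)

-- ===== LEMMAS AND PROOFS =====

-- Folding B's step over a constant-level block of the table raises the accumulator to
-- (max b c) exactly when some keyword of the block matches.
theorem foldl_const_level (f : String → Bool) (xs : List String) (c b : Int) :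
    ((xs.map (fun k => (k, c))).foldl
        (fun best p => if f p.1 then max best p.2 else best) b)
      = if xs.any f then max b c else b := by
  induction xs generalizing b with
  | nil => simp
  | cons x rest ih =>
    by_cases hx : f x = true
    · simp [hx, ih]
    · simp [hx, ih]

theorem table_driven_eq (f : String → Bool) :
    (if (["life-changing", "blown me away", "bone", "beyond words", "terrifying",
          "profound", "ecstatic", "knochenmark", "speechless", "sprachlos"] : List String).any f
       then (5:Int)
     else if (["breathtaking", "magical", "privileged", "calm washes",
               "otherworldly", "atemberaub"] : List String).any f then 4 else 3)
    = ([("life-changing", (5:Int)), ("blown me away", 5), ("bone", 5), ("beyond words", 5),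
        ("terrifying", 5), ("profound", 5), ("ecstatic", 5), ("knochenmark", 5),
        ("speechless", 5), ("sprachlos", 5),
        ("breathtaking", 4), ("magical", 4), ("privileged", 4), ("calm washes", 4),
        ("otherworldly", 4), ("atemberaub", 4)] : List (String × Int)).foldl
        (fun best p => if f p.1 then max best p.2 else best) 3 := by
  have htab :
      ([("life-changing", (5:Int)), ("blown me away", 5), ("bone", 5), ("beyond words", 5),
        ("terrifying", 5), ("profound", 5), ("ecstatic", 5), ("knochenmark", 5),
        ("speechless", 5), ("sprachlos", 5),
        ("breathtaking", 4), ("magical", 4), ("privileged", 4), ("calm washes", 4),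
        ("otherworldly", 4), ("atemberaub", 4)] : List (String × Int))
      = (["life-changing", "blown me away", "bone", "beyond words", "terrifying",
          "profound", "ecstatic", "knochenmark", "speechless", "sprachlos"].map
            (fun k => (k, (5:Int))))
        ++ (["breathtaking", "magical", "privileged", "calm washes",
             "otherworldly", "atemberaub"].map (fun k => (k, (4:Int)))) := rfl
  rw [htab, List.foldl_append, foldl_const_level, foldl_const_level]
  cases hS : (["life-changing", "blown me away", "bone", "beyond words", "terrifying",
      "profound", "ecstatic", "knochenmark", "speechless", "sprachlos"] : List String).any f <;>
  cases hM : (["breathtaking", "magical", "privileged", "calm washes",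
      "otherworldly", "atemberaub"] : List String).any f <;>
  simp

theorem infer_intensity_eq (excerpt : String) :
    infer_intensity_py excerpt = infer_intensity_py_alt excerpt := by
  unfold infer_intensity_py infer_intensity_py_alt
  dsimp only
  exact table_driven_eq _

-- ===== VERDICT (by name: the statement is the Claim_ definition above) =====
theorem infer_intensity_py_spec : Claim_equal_infer_intensity_py := by
  intro excerpt _
  exact infer_intensity_eq excerpt
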